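-- pv_equiv track=rewrite | github.com/ebooth1202/agent_c_framework | learn/example_code/example_6.py | segment_blog_posts
-- ===== SOURCE A (Python) =====
-- def segment_blog_posts(content):
--     posts = []
--     current_post = []
--
--     for line in content.split('\n'):
--         if line.startswith('# Blog post title:'):
--             if current_post:
--                 posts.append('\n'.join(current_post))
--                 current_post = []
--             current_post.append(line)
--         else:
--             current_post.append(line)
--
--     if current_post:
--         posts.append('\n'.join(current_post))
--
--     return posts
-- ===== SOURCE B (Python) =====
-- def _chunks(lines):
--     if not lines:
--         return []
--     j = 1
--     while j < len(lines) and not lines[j].startswith('# Blog post title:'):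
--         j += 1
--     return ['\n'.join(lines[:j])] + _chunks(lines[j:])
--
--
-- def segment_blog_posts(content):
--     return _chunks(content.split('\n'))
-- ===== Notes on version B (the rewrite author's own statement) =====
-- stated objective: simpler
-- what changed: Replaces the running posts/current_post accumulator fold with a recursive chunking decomposition: emit the maximal group up to the next marker line, then recurse on the remaining lines.
import Mathlib
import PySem

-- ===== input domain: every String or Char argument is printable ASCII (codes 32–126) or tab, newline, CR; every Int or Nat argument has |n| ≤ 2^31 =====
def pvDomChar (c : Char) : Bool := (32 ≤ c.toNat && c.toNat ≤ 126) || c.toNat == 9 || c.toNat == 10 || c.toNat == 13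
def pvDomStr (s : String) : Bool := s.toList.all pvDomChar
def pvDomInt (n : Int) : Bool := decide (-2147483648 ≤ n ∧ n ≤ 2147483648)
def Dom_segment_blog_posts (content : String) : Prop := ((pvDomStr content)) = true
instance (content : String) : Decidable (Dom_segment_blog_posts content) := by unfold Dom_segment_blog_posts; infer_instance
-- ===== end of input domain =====

-- B replaces A's running posts/current_post accumulator with a recursive
-- "emit chunk up to next marker, recurse on rest" decomposition (objective: simpler).


-- ===== PORT A =====
-- line.startswith('# Blog post title:')
def segMark (l : String) : Bool := PySem.Str.startswith l "# Blog post title:"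

-- the body of A's for-loop, carrying (posts, current_post)
def segAStep (st : List String × List String) (line : String) : List String × List String :=
  if segMark line then
    if st.2 ≠ [] then (st.1 ++ [PySem.Str.join "\n" st.2], [] ++ [line])
    else (st.1, st.2 ++ [line])
  else (st.1, st.2 ++ [line])

def segment_blog_posts (content : String) : List String :=
  let st := ((PySem.Str.split? content "\n").getD []).foldl segAStep ([], [])
  if st.2 ≠ [] then st.1 ++ [PySem.Str.join "\n" st.2] else st.1

-- ===== PORT B =====
-- transliteration of B's _chunks: the inner while-loop locating j is the
-- takeWhile/dropWhile split of the tail (lines[:j] = l :: grp, lines[j:] = rest')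
def segChunks (lines : List String) : List String :=
  match lines with
  | [] => []
  | l :: rest =>
      PySem.Str.join "\n" (l :: rest.takeWhile (fun x => !(segMark x)))
        :: segChunks (rest.dropWhile (fun x => !(segMark x)))
termination_by lines.length
decreasing_by
  simp only [List.length_cons]
  exact Nat.lt_succ_of_le (List.length_dropWhile_le _ _)

def segment_blog_posts_alt (content : String) : List String :=
  segChunks ((PySem.Str.split? content "\n").getD [])

-- ===== PRECONDITION & SPEC =====
def Spec_segment_blog_posts (content : String) (out : List String) : Prop := out = segment_blog_posts_alt content
instance (content : String) (out : List String) : Decidable (Spec_segment_blog_posts content out) := by unfold Spec_segment_blog_posts; infer_instance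

-- ===== CLAIM (what is proved, stated in full; the proofs are below) =====
def Claim_equal_segment_blog_posts : Prop := ∀ (content : String), Dom_segment_blog_posts content → Spec_segment_blog_posts content (segment_blog_posts content)

-- ===== LEMMAS AND PROOFS =====

-- A's fold, expressed recursively over the remaining lines with the in-progress group `cur`
def segC (cur : List String) : List String → List String
  | [] => if cur ≠ [] then [PySem.Str.join "\n" cur] else []
  | l :: ls =>
      if segMark l ∧ cur ≠ [] then
        PySem.Str.join "\n" cur :: segC [l] ls
      else segC (cur ++ [l]) ls

theorem segC_eq_fold (ls : List String) : ∀ (posts cur : List String),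
    (let st := ls.foldl segAStep (posts, cur)
     if st.2 ≠ [] then st.1 ++ [PySem.Str.join "\n" st.2] else st.1)
    = posts ++ segC cur ls := by
  induction ls with
  | nil =>
    intro posts cur
    simp only [List.foldl_nil, segC]
    split_ifs <;> simp
  | cons l ls ih =>
    intro posts cur
    rw [List.foldl_cons]
    by_cases hm : segMark l = true
    · by_cases hc : cur = []
      · rw [show segAStep (posts, cur) l = (posts, cur ++ [l]) by
            simp [segAStep, hm, hc]]
        rw [show segC cur (l :: ls) = segC (cur ++ [l]) ls by
            simp [segC, hc]]
        exact ih posts (cur ++ [l])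
      · rw [show segAStep (posts, cur) l = (posts ++ [PySem.Str.join "\n" cur], [l]) by
            simp [segAStep, hm, hc]]
        rw [show segC cur (l :: ls) = PySem.Str.join "\n" cur :: segC [l] ls by
            simp [segC, hm, hc]]
        rw [ih (posts ++ [PySem.Str.join "\n" cur]) [l]]
        simp
    · rw [show segAStep (posts, cur) l = (posts, cur ++ [l]) by
          simp [segAStep, hm]]
      rw [show segC cur (l :: ls) = segC (cur ++ [l]) ls by
          simp [segC, hm]]
      exact ih posts (cur ++ [l])

theorem segC_nonempty (ls : List String) : ∀ (cur : List String), cur ≠ [] →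
    segC cur ls
    = PySem.Str.join "\n" (cur ++ ls.takeWhile (fun x => !(segMark x)))
      :: segChunks (ls.dropWhile (fun x => !(segMark x))) := by
  induction ls with
  | nil =>
    intro cur hc
    simp [segC, hc, segChunks]
  | cons l ls ih =>
    intro cur hc
    by_cases hm : segMark l = true
    · rw [show segC cur (l :: ls) = PySem.Str.join "\n" cur :: segC [l] ls by
          simp [segC, hm, hc]]
      have ht : (l :: ls).takeWhile (fun x => !(segMark x)) = [] := by
        simp [hm]
      have hd : (l :: ls).dropWhile (fun x => !(segMark x)) = l :: ls := by
        simp [hm]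
      rw [ht, hd, List.append_nil, segChunks]
      rw [ih [l] (by simp)]
      simp
    · rw [show segC cur (l :: ls) = segC (cur ++ [l]) ls by
          simp [segC, hm]]
      rw [ih (cur ++ [l]) (by simp)]
      have ht : (l :: ls).takeWhile (fun x => !(segMark x))
          = l :: ls.takeWhile (fun x => !(segMark x)) := by
        simp [hm]
      have hd : (l :: ls).dropWhile (fun x => !(segMark x))
          = ls.dropWhile (fun x => !(segMark x)) := by
        simp [hm]
      rw [ht, hd]
      simp

theorem segC_nil_eq_chunks (ls : List String) : segC [] ls = segChunks ls := by
  cases ls with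
  | nil => simp [segC, segChunks]
  | cons l ls =>
    rw [show segC ([] : List String) (l :: ls) = segC [l] ls by simp [segC]]
    rw [segC_nonempty ls [l] (by simp), segChunks]
    simp

-- ===== VERDICT (by name: the statement is the Claim_ definition above) =====
theorem segment_blog_posts_spec : Claim_equal_segment_blog_posts := by
  intro content _
  unfold Spec_segment_blog_posts segment_blog_posts segment_blog_posts_alt
  rw [segC_eq_fold ((PySem.Str.split? content "\n").getD []) [] []]
  rw [segC_nil_eq_chunks]
  simp
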